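-- pv_equiv track=rewrite | github.com/superlibj/DevMind | src/core/tools/worktree_system/enter_worktree_tool.py | _is_valid_branch_name
-- ===== SOURCE A (Python) =====
-- def _is_valid_branch_name(branch_name: str) -> bool:
--     """Validate git branch name format."""
--     # Basic validation for git branch names
--     if not branch_name:
--         return False
--
--     # Can't start or end with slash, can't contain double slashes
--     if branch_name.startswith('/') or branch_name.endswith('/') or '//' in branch_name:
--         return False
--
--     # Can't contain certain special characters
--     invalid_chars = [' ', '~', '^', ':', '?', '*', '[', '\\', '..']
--     for char in invalid_chars:
--         if char in branch_name:
--             return False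
--
--     # Can't be just dots
--     if branch_name.strip('.') == '':
--         return False
--
--     return True
-- ===== SOURCE B (Python) =====
-- def _is_valid_branch_name(branch_name: str) -> bool:
--     """Validate git branch name format (single state-maintaining pass)."""
--     if not branch_name:
--         return False
--     if branch_name[0] == '/' or branch_name[-1] == '/':
--         return False
--     prev = None
--     seen_non_dot = False
--     for ch in branch_name:
--         if ch in ' ~^:?*[\\':
--             return False
--         if prev == '.' and ch == '.':
--             return False
--         if prev == '/' and ch == '/':
--             return False
--         if ch != '.':
--             seen_non_dot = True
--         prev = ch
--     return seen_non_dot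
-- ===== Notes on version B (the rewrite author's own statement) =====
-- stated objective: alternative
-- what changed: A makes many separate whole-string scans (prefix/suffix tests, a double-slash substring test, nine membership tests, an all-dots strip test); B validates in one state-maintaining pass over the characters, tracking the previous character and a seen-non-dot flag.
import Mathlib
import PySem

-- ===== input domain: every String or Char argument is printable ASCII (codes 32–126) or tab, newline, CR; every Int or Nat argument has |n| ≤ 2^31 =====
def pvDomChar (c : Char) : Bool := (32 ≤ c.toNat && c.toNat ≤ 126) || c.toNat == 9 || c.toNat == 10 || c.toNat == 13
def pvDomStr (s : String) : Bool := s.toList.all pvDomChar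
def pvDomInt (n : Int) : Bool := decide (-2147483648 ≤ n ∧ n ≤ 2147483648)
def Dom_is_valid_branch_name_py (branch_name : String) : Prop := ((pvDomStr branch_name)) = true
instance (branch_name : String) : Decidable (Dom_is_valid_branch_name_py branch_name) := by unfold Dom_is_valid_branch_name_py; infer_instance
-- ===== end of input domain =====

-- B replaces A's many whole-string scans (startswith/endswith/'//' in/9 × 'char in'/strip) by ONE
-- state-maintaining pass over the characters (prev char + seen_non_dot flag); alternative decomposition, same O(n).

-- ===== PORT A =====
-- the 'for char in invalid_chars: if char in branch_name: return False' loop of A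
def pvAHasInvalid (s : String) : List String → Bool
  | [] => false
  | c :: rest => if PySem.Str.isIn c s then true else pvAHasInvalid s rest

def is_valid_branch_name_py (branch_name : String) : Bool :=
  if branch_name.toList = [] then false
  else if PySem.Str.startswith branch_name "/" || PySem.Str.endswith branch_name "/"
          || PySem.Str.isIn "//" branch_name then false
  else if pvAHasInvalid branch_name [" ", "~", "^", ":", "?", "*", "[", "\\", ".."] then false
  else if PySem.Str.stripChars branch_name "." == "" then false
  else true

-- ===== PORT B =====
-- single-character invalid set of B ("ch in ' ~^:?*[\\'")
def pvBadChar (c : Char) : Bool :=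
  c == ' ' || c == '~' || c == '^' || c == ':' || c == '?' || c == '*' || c == '[' || c == '\\'

-- B's loop: prev = previous character (None before the first), seen = seen_non_dot
def pvScanB (prev : Option Char) (seen : Bool) : List Char → Bool
  | [] => seen
  | c :: rest =>
    if pvBadChar c then false
    else if prev == some '.' && c == '.' then false
    else if prev == some '/' && c == '/' then false
    else pvScanB (some c) (seen || c != '.') rest

def is_valid_branch_name_py_alt (branch_name : String) : Bool :=
  match branch_name.toList with
  | [] => false
  | c :: rest =>
    if c == '/' || (c :: rest).getLast? == some '/' then false
    else pvScanB none false (c :: rest)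

-- ===== PRECONDITION & SPEC =====
def Spec_is_valid_branch_name_py (branch_name : String) (out : Bool) : Prop := out = is_valid_branch_name_py_alt branch_name
instance (branch_name : String) (out : Bool) : Decidable (Spec_is_valid_branch_name_py branch_name out) := by unfold Spec_is_valid_branch_name_py; infer_instance

-- ===== CLAIM (what is proved, stated in full; the proofs are below) =====
def Claim_equal_is_valid_branch_name_py : Prop := ∀ (branch_name : String), Dom_is_valid_branch_name_py branch_name → Spec_is_valid_branch_name_py branch_name (is_valid_branch_name_py branch_name)

-- ===== LEMMAS AND PROOFS =====

-- a pair (a, b) of adjacent characters both programs reject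
def pvPairBad (a b : Char) : Bool := (a == '.' && b == '.') || (a == '/' && b == '/')

-- no rejected adjacent pair anywhere in the list
def pvOkPairs : List Char → Bool
  | [] => true
  | [_] => true
  | a :: b :: rest => !pvPairBad a b && pvOkPairs (b :: rest)

-- common normal form of both programs
def pvSpec (cs : List Char) : Bool :=
  !cs.isEmpty && !(cs.head? == some '/') && !(cs.getLast? == some '/')
  && pvOkPairs cs && cs.all (fun c => !pvBadChar c) && cs.any (fun c => c != '.')

lemma pvGuard (c r : Bool) : (if c = true then false else r) = (!c && r) := by
  cases c <;> simp

lemma pvIfOr (a b : Bool) : (if a = true then true else b) = (a || b) := by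
  cases a <;> simp

lemma pvSingleton_prefix_iff (l : List Char) (c : Char) : [c] <+: l ↔ l.head? = some c := by
  cases l with
  | nil => simp
  | cons a t => simp [List.cons_prefix_cons, eq_comm]

lemma pvSingleton_suffix_iff (l : List Char) (c : Char) : [c] <:+ l ↔ l.getLast? = some c := by
  constructor
  · rintro ⟨t, rfl⟩; simp
  · intro h
    obtain ⟨l', rfl⟩ := List.getLast?_eq_some_iff.mp h
    exact ⟨l', rfl⟩

lemma pvPair_infix_iff (l : List Char) (x y : Char) :
    [x, y] <:+: l ↔ ∃ pre suf, l = pre ++ x :: y :: suf := by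
  constructor
  · rintro ⟨pre, suf, rfl⟩; exact ⟨pre, suf, by simp⟩
  · rintro ⟨pre, suf, rfl⟩; exact ⟨pre, suf, by simp⟩

lemma pvOkPairs_iff (l : List Char) :
    pvOkPairs l = true ↔ ¬ (['.', '.'] <:+: l ∨ ['/', '/'] <:+: l) := by
  induction l with
  | nil => simp [pvOkPairs]
  | cons a t ih =>
    cases t with
    | nil =>
      simp only [pvOkPairs, true_iff]
      rintro (h | h) <;>
        · rw [pvPair_infix_iff] at h
          obtain ⟨pre, suf, he⟩ := h
          cases pre <;> simp_all
    | cons b r =>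
      simp only [pvOkPairs, Bool.and_eq_true, Bool.not_eq_true', ih]
      constructor
      · rintro ⟨hp, hn⟩ h
        rcases h with h | h
        · rw [pvPair_infix_iff] at h
          obtain ⟨pre, suf, he⟩ := h
          cases pre with
          | nil =>
            simp only [List.nil_append, List.cons.injEq] at he
            obtain ⟨rfl, rfl, rfl⟩ := he
            simp [pvPairBad] at hp
          | cons p ps =>
            simp only [List.cons_append, List.cons.injEq] at he
            exact hn (Or.inl ((pvPair_infix_iff _ _ _).mpr ⟨ps, suf, he.2⟩))
        · rw [pvPair_infix_iff] at h
          obtain ⟨pre, suf, he⟩ := h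
          cases pre with
          | nil =>
            simp only [List.nil_append, List.cons.injEq] at he
            obtain ⟨rfl, rfl, rfl⟩ := he
            simp [pvPairBad] at hp
          | cons p ps =>
            simp only [List.cons_append, List.cons.injEq] at he
            exact hn (Or.inr ((pvPair_infix_iff _ _ _).mpr ⟨ps, suf, he.2⟩))
      · intro hn
        constructor
        · by_contra hp
          simp only [Bool.not_eq_false, pvPairBad, Bool.or_eq_true, Bool.and_eq_true,
            beq_iff_eq] at hp
          rcases hp with ⟨rfl, rfl⟩ | ⟨rfl, rfl⟩
          · exact hn (Or.inl ((pvPair_infix_iff _ _ _).mpr ⟨[], r, rfl⟩))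
          · exact hn (Or.inr ((pvPair_infix_iff _ _ _).mpr ⟨[], r, rfl⟩))
        · rintro (h | h)
          · rw [pvPair_infix_iff] at h
            obtain ⟨pre, suf, he⟩ := h
            exact hn (Or.inl ((pvPair_infix_iff _ _ _).mpr ⟨a :: pre, suf, by simp [he]⟩))
          · rw [pvPair_infix_iff] at h
            obtain ⟨pre, suf, he⟩ := h
            exact hn (Or.inr ((pvPair_infix_iff _ _ _).mpr ⟨a :: pre, suf, by simp [he]⟩))

lemma pvDropWhile_rev_nil_iff (p : Char → Bool) (cs : List Char) :
    (List.dropWhile p (List.dropWhile p cs).reverse).reverse = [] ↔ ∀ c ∈ cs, p c := by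
  constructor
  · intro h
    rw [List.reverse_eq_nil_iff, List.dropWhile_eq_nil_iff] at h
    intro c hc
    by_cases hd : List.dropWhile p cs = []
    · exact (List.dropWhile_eq_nil_iff.mp hd) c hc
    · exfalso
      have hhead := List.head_dropWhile_not p hd
      have hmem : (List.dropWhile p cs).head hd ∈ (List.dropWhile p cs).reverse := by
        simp only [List.mem_reverse]; exact List.head_mem hd
      simp [h _ hmem] at hhead
  · intro h
    have hd : List.dropWhile p cs = [] := List.dropWhile_eq_nil_iff.mpr h
    simp [hd]

lemma pvStrip_empty_iff (s : String) :
    PySem.Str.stripChars s "." = "" ↔ ∀ c ∈ s.toList, c = '.' := by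
  rw [← String.toList_inj]
  simp only [PySem.Str.toList_stripChars, PySem.Chars.stripChars, String.toList_empty]
  rw [pvDropWhile_rev_nil_iff]
  constructor
  · intro h c hc
    have := h c hc
    simpa [show ".".toList = ['.'] from rfl] using this
  · intro h c hc
    simp [show ".".toList = ['.'] from rfl, h c hc]

lemma pvBadChar_mem_iff (l : List Char) :
    (l.all fun c => !pvBadChar c) = true ↔
      ¬ (' ' ∈ l ∨ '~' ∈ l ∨ '^' ∈ l ∨ ':' ∈ l ∨ '?' ∈ l ∨ '*' ∈ l ∨ '[' ∈ l ∨ '\\' ∈ l) := by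
  simp only [List.all_eq_true, Bool.not_eq_true', pvBadChar]
  constructor
  · intro h
    rintro (hc | hc | hc | hc | hc | hc | hc | hc) <;> · have := h _ hc; simp at this
  · intro hn c hc
    by_contra hb
    simp only [Bool.not_eq_false, Bool.or_eq_true, beq_iff_eq] at hb
    rcases hb with ((((((rfl | rfl) | rfl) | rfl) | rfl) | rfl) | rfl) | rfl <;> tauto

lemma pvAHasInvalid_eq (s : String) :
    pvAHasInvalid s [" ", "~", "^", ":", "?", "*", "[", "\\", ".."]
      = (PySem.Str.isIn " " s || (PySem.Str.isIn "~" s || (PySem.Str.isIn "^" s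
        || (PySem.Str.isIn ":" s || (PySem.Str.isIn "?" s || (PySem.Str.isIn "*" s
        || (PySem.Str.isIn "[" s || (PySem.Str.isIn "\\" s || PySem.Str.isIn ".." s)))))))) := by
  simp only [pvAHasInvalid, pvIfOr, Bool.or_false]

-- A's value is the normal form
lemma pvA_eq (s : String) : is_valid_branch_name_py s = pvSpec s.toList := by
  unfold is_valid_branch_name_py
  by_cases hnil : s.toList = []
  · simp [hnil, pvSpec]
  · rw [if_neg hnil, pvAHasInvalid_eq, pvGuard, pvGuard, pvGuard, Bool.eq_iff_iff]
    simp only [pvSpec, Bool.and_eq_true, Bool.not_eq_true', Bool.eq_false_iff, ne_eq,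
      PySem.Str.startswith_eq, PySem.Str.endswith_eq, Bool.or_eq_true,
      PySem.Chars.startswith_iff, PySem.Chars.endswith_iff, PySem.Str.isIn_iff_infix,
      show "/".toList = ['/'] from rfl, show "//".toList = ['/', '/'] from rfl,
      show "..".toList = ['.', '.'] from rfl, show " ".toList = [' '] from rfl,
      show "~".toList = ['~'] from rfl, show "^".toList = ['^'] from rfl,
      show ":".toList = [':'] from rfl, show "?".toList = ['?'] from rfl,
      show "*".toList = ['*'] from rfl, show "[".toList = ['['] from rfl,
      show "\\".toList = ['\\'] from rfl,
      pvSingleton_prefix_iff, pvSingleton_suffix_iff, List.singleton_infix_iff,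
      pvStrip_empty_iff, pvOkPairs_iff, pvBadChar_mem_iff, beq_iff_eq,
      List.any_eq_true, bne_iff_ne, not_or, and_true, List.isEmpty_iff, hnil,
      not_false_iff, true_and, not_forall]
    tauto

-- B's loop characterised
lemma pvScanB_some (p : Char) (seen : Bool) (cs : List Char) :
    pvScanB (some p) seen cs =
      (cs.all (fun c => !pvBadChar c) && pvOkPairs (p :: cs)
        && (seen || cs.any (fun c => c != '.'))) := by
  induction cs generalizing p seen with
  | nil => simp [pvScanB, pvOkPairs]
  | cons c rest ih =>
    simp only [pvScanB]
    by_cases hb : pvBadChar c = true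
    · simp [hb, pvOkPairs]
    · by_cases hp : pvPairBad p c = true
      · have hok : pvOkPairs (p :: c :: rest) = (!pvPairBad p c && pvOkPairs (c :: rest)) := rfl
        simp only [pvPairBad, Bool.or_eq_true, Bool.and_eq_true, beq_iff_eq] at hp
        rcases hp with ⟨rfl, rfl⟩ | ⟨rfl, rfl⟩ <;> simp [hok, pvPairBad, hb]
      · have h1 : (some p == some '.' && c == '.') = false := by
          simp only [pvPairBad, Bool.or_eq_true, Bool.and_eq_true, beq_iff_eq] at hp
          by_contra h; simp only [Bool.not_eq_false, Bool.and_eq_true, beq_iff_eq,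
            Option.some.injEq] at h; tauto
        have h2 : (some p == some '/' && c == '/') = false := by
          simp only [pvPairBad, Bool.or_eq_true, Bool.and_eq_true, beq_iff_eq] at hp
          by_contra h; simp only [Bool.not_eq_false, Bool.and_eq_true, beq_iff_eq,
            Option.some.injEq] at h; tauto
        rw [if_neg (by simp [hb]), if_neg (by rw [h1]; simp), if_neg (by rw [h2]; simp), ih]
        have hok : pvOkPairs (p :: c :: rest) = (!pvPairBad p c && pvOkPairs (c :: rest)) := rfl
        simp [hok, hp, hb, Bool.or_assoc, Bool.and_assoc, List.all_cons, List.any_cons]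

-- B's value is the normal form
lemma pvB_eq (s : String) : is_valid_branch_name_py_alt s = pvSpec s.toList := by
  unfold is_valid_branch_name_py_alt
  cases hl : s.toList with
  | nil => simp [pvSpec]
  | cons c rest =>
    simp only [pvSpec]
    by_cases hg : (c == '/' || (c :: rest).getLast? == some '/') = true
    · rw [if_pos hg]
      simp only [Bool.or_eq_true, beq_iff_eq] at hg
      rcases hg with rfl | hg
      · simp
      · simp [hg]
    · rw [if_neg hg]
      simp only [Bool.or_eq_true, not_or, Bool.not_eq_true] at hg
      obtain ⟨hc, hlast⟩ := hg
      have hstep : pvScanB none false (c :: rest) =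
          if pvBadChar c = true then false else pvScanB (some c) (c != '.') rest := by
        simp [pvScanB]
      rw [hstep]
      by_cases hb : pvBadChar c = true
      · simp [hb]
      · rw [if_neg hb, pvScanB_some]
        simp [hb, hc, hlast, Bool.and_assoc, Bool.and_comm]

-- ===== VERDICT (by name: the statement is the Claim_ definition above) =====
theorem is_valid_branch_name_py_spec : Claim_equal_is_valid_branch_name_py := by
  intro s _
  unfold Spec_is_valid_branch_name_py
  rw [pvA_eq, pvB_eq]
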